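-- pv_equiv track=rewrite | github.com/mihaMaks/2022SegmentationST | evaluation/evaluate.py | compare_len
-- ===== SOURCE A (Python) =====
-- def compare_len(real_segm, pred_segm):
--     real = set()
--     pred = set()
--     real_str = ""
--     pred_str = ""
--     c = 0
--     for s in real_segm.split('|'):
--         real.add((c, s))
--         real_str += s
--         c += len(s)
--     r_len = c
--
--     c = 0
--     for s in pred_segm.split('|'):
--         pred.add((c, s))
--         pred_str += s
--         c += len(s)
--     p_len = c
--
--     if r_len != p_len or real_str != pred_str:
--         return False
--     return True
-- ===== SOURCE B (Python) =====
-- def compare_len(real_segm, pred_segm):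
--     return real_segm.replace('|', '') == pred_segm.replace('|', '')
-- ===== Notes on version B (the rewrite author's own statement) =====
-- stated objective: simpler
-- what changed: Replaces the two accumulation loops (with their unused set/offset machinery) by a single expression comparing the delimiter-stripped strings via str.replace; the length check is dropped because equal strings always have equal lengths.
import Mathlib
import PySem

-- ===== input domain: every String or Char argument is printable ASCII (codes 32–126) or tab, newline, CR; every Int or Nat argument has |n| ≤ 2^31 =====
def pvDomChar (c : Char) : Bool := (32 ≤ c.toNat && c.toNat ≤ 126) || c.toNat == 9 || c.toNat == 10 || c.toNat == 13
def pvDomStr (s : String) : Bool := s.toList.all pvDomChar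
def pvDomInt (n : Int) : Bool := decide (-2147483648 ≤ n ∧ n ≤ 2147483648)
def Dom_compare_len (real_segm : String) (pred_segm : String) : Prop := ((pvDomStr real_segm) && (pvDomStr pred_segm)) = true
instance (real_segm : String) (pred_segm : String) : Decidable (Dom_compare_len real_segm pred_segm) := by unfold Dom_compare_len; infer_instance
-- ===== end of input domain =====

-- B replaces A's two accumulation loops (and their unused set/offset bookkeeping) by a single
-- comparison of the delimiter-stripped strings via str.replace; objective: simpler.


-- ===== PORT A =====
-- one loop iteration of A: add (c, s) to the set, append s to the accumulated string
-- (kept as its char list), advance c by len(s)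
def pvStepA (st : PySem.Set (Int × List Char) × List Char × Int) (s : List Char) :
    PySem.Set (Int × List Char) × List Char × Int :=
  (st.1.add (st.2.2, s), st.2.1 ++ s, st.2.2 + (s.length : Int))

def compare_len (real_segm : String) (pred_segm : String) : Bool :=
  -- first loop: over real_segm.split('|')
  let stR := (PySem.Chars.splitOn real_segm.toList ['|']).foldl pvStepA
      (PySem.Set.ofList [], ([] : List Char), (0 : Int))
  let real_str := stR.2.1
  let r_len := stR.2.2
  -- second loop: over pred_segm.split('|')
  let stP := (PySem.Chars.splitOn pred_segm.toList ['|']).foldl pvStepA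
      (PySem.Set.ofList [], ([] : List Char), (0 : Int))
  let pred_str := stP.2.1
  let p_len := stP.2.2
  if r_len ≠ p_len ∨ real_str ≠ pred_str then false else true

-- ===== PORT B =====
def compare_len_alt (real_segm : String) (pred_segm : String) : Bool :=
  PySem.Chars.replace real_segm.toList ['|'] [] == PySem.Chars.replace pred_segm.toList ['|'] []

-- ===== PRECONDITION & SPEC =====
def Spec_compare_len (real_segm : String) (pred_segm : String) (out : Bool) : Prop := out = compare_len_alt real_segm pred_segm
instance (real_segm : String) (pred_segm : String) (out : Bool) : Decidable (Spec_compare_len real_segm pred_segm out) := by unfold Spec_compare_len; infer_instance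

-- ===== CLAIM (what is proved, stated in full; the proofs are below) =====
def Claim_equal_compare_len : Prop := ∀ (real_segm : String) (pred_segm : String), Dom_compare_len real_segm pred_segm → Spec_compare_len real_segm pred_segm (compare_len real_segm pred_segm)

-- ===== LEMMAS AND PROOFS =====

-- A's loop: the accumulated string is the concatenation of the pieces, the counter their total length
theorem pvFold_spec (ps : List (List Char)) :
    ∀ (S : PySem.Set (Int × List Char)) (acc : List Char) (c : Int),
      (ps.foldl pvStepA (S, acc, c)).2 = (acc ++ ps.flatten, c + (ps.flatten.length : Int)) := by
  induction ps with
  | nil => intro S acc c; simp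
  | cons h t ih =>
    intro S acc c
    simp only [List.foldl_cons, pvStepA, ih, List.flatten_cons, Prod.mk.injEq,
      List.append_assoc, List.length_append, true_and]
    push_cast; ring

-- removing a one-char separator: replace.go with old = ['|'], new = [] filters '|' out
theorem pvReplaceGo_filter :
    ∀ (fuel : Nat) (l acc : List Char), l.length ≤ fuel →
      PySem.Chars.replace.go ['|'] [] fuel l acc = acc.reverse ++ l.filter (fun c => c ≠ '|') := by
  intro fuel
  induction fuel with
  | zero =>
    intro l acc h
    have : l = [] := List.eq_nil_of_length_eq_zero (Nat.le_zero.mp h)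
    subst this; simp [PySem.Chars.replace.go]
  | succ n ih =>
    intro l acc h
    cases l with
    | nil => simp [PySem.Chars.replace.go]
    | cons c t =>
      by_cases hc : c = '|'
      · subst hc
        simp only [PySem.Chars.replace.go, List.isPrefixOf, BEq.rfl, Bool.true_and,
          List.isPrefixOf_nil_left, if_true, List.length_singleton, List.drop_one, List.tail_cons,
          List.reverse_nil, List.nil_append]
        rw [ih t acc (Nat.succ_le_succ_iff.mp (by simpa using h))]
        simp
      · have hpre : (['|'].isPrefixOf (c :: t)) = false := by
          simp [List.isPrefixOf]; exact fun hh => (hc hh.symm).elim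
        simp only [PySem.Chars.replace.go, hpre, if_false]
        rw [ih t (c :: acc) (Nat.succ_le_succ_iff.mp (by simpa using h))]
        simp [hc]

-- splitting on a one-char separator and concatenating the pieces also filters '|' out
theorem pvSplitGo_flatten :
    ∀ (fuel : Nat) (l cur : List Char) (accs : List (List Char)), l.length ≤ fuel →
      (PySem.Chars.splitOn.go ['|'] fuel l cur accs).flatten
        = accs.reverse.flatten ++ cur.reverse ++ l.filter (fun c => c ≠ '|') := by
  intro fuel
  induction fuel with
  | zero =>
    intro l cur accs h
    have : l = [] := List.eq_nil_of_length_eq_zero (Nat.le_zero.mp h)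
    subst this
    simp [PySem.Chars.splitOn.go]
  | succ n ih =>
    intro l cur accs h
    cases l with
    | nil => simp [PySem.Chars.splitOn.go]
    | cons c t =>
      have ht : t.length ≤ n := Nat.succ_le_succ_iff.mp (by simpa using h)
      by_cases hc : c = '|'
      · subst hc
        simp only [PySem.Chars.splitOn.go, List.isPrefixOf, BEq.rfl, Bool.true_and,
          List.isPrefixOf_nil_left, if_true, List.length_singleton, List.drop_one, List.tail_cons]
        rw [ih t [] (cur.reverse :: accs) ht]
        simp
      · have hpre : (['|'].isPrefixOf (c :: t)) = false := by
          simp [List.isPrefixOf]; exact fun hh => (hc hh.symm).elim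
        simp only [PySem.Chars.splitOn.go, hpre, Bool.false_eq_true, if_false]
        rw [ih t (c :: cur) accs ht]
        simp [hc]

theorem pvReplace_eq_filter (cs : List Char) :
    PySem.Chars.replace cs ['|'] [] = cs.filter (fun c => c ≠ '|') := by
  unfold PySem.Chars.replace
  simp [pvReplaceGo_filter cs.length cs [] (le_refl _)]

theorem pvSplit_flatten (cs : List Char) :
    (PySem.Chars.splitOn cs ['|']).flatten = cs.filter (fun c => c ≠ '|') := by
  unfold PySem.Chars.splitOn
  rw [pvSplitGo_flatten (cs.length + 1) cs [] [] (Nat.le_succ _)]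
  simp

-- ===== VERDICT (by name: the statement is the Claim_ definition above) =====
theorem compare_len_spec : Claim_equal_compare_len := by
  intro r p _
  unfold Spec_compare_len compare_len compare_len_alt
  simp only [pvFold_spec, pvSplit_flatten, pvReplace_eq_filter]
  by_cases h : List.filter (fun c => !decide (c = '|')) r.toList
      = List.filter (fun c => !decide (c = '|')) p.toList
  · simp [h, beq_iff_eq]
  · simp [h, beq_iff_eq]
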